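-- pv_equiv track=rewrite | github.com/Aasthaengg/IBMdataset | Python_codes/p03329/s046511485.py | calc_dp
-- ===== SOURCE A (Python) =====
-- def calc_dp(n):
--     initial = 10**7
--     dp=[initial for _ in range(100100)]#dp用の配列はすこし大きめに作る
--     dp[0] = 0
--
--     for i in range(100001):
--         count = 0
--         while 6**count <= n:
--             power_six = 6**count
--             count += 1
--             if i - power_six >= 0:
--                 dp[i] = min(dp[i],1 + dp[i-power_six])
--
--         count = 1
--         while 9**count <= n:
--             power_nine = 9**count
--             count += 1
--             if i - power_nine >= 0:
--                 dp[i] = min(dp[i],1 + dp[i-power_nine])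
--
--     return dp[n]
-- ===== SOURCE B (Python) =====
-- def _digit_sum(m, base):
--     s = 0
--     while m:
--         s += m % base
--         m //= base
--     return s
--
-- def calc_dp(n):
--     # n = a + b: 'a' paid with powers of 6 (base-6 digit sum coins), 'b' with
--     # powers of 9 (base-9 digit sum; its units are paid with 1 = 6**0 coins).
--     best = None
--     for a in range(n + 1):
--         c = _digit_sum(a, 6) + _digit_sum(n - a, 9)
--         if best is None or c < best:
--             best = c
--     return best
-- ===== Notes on version B (the rewrite author's own statement) =====
-- stated objective: faster
-- what changed: A fills a 100100-slot min-coins DP table over all 100001 indices with repeatedly re-exponentiated powers; B uses no DP at all: it scans splits n = a + b and returns the minimum of digit_sum_base6(a) + digit_sum_base9(b), which equals the minimal number of powers of 6 and 9 summing to n.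
-- outside the precondition, e.g. on calc_dp(100100): A raises IndexError, B returns 7; on calc_dp(-1): A returns 10000000, B returns None; on calc_dp(-100100): A returns 0, B returns None
import Mathlib
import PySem

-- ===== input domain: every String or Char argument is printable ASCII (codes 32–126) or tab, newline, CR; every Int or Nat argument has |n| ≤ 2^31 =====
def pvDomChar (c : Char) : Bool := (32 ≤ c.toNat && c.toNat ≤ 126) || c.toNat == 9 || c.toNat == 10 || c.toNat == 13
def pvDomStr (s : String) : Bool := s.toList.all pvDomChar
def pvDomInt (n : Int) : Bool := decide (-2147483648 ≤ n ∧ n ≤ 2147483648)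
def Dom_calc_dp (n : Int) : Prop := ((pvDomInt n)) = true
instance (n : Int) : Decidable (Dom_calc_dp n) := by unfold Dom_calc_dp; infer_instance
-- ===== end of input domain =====

-- B drops A's 100100-slot min-coins DP table entirely: it minimises
-- digitsum_6(a) + digitsum_9(n-a) over the splits n = a + (n-a) (objective: faster).

-- ===== PORT A =====
-- one `dp[i] = min(dp[i], 1 + dp[i-power])` update, guarded exactly as in A
def aUpd (i p : Int) (dp : Array Int) : Array Int :=
  if i - p ≥ 0 then
    dp.setIfInBounds i.toNat (min (dp.getD i.toNat 0) (1 + dp.getD (i - p).toNat 0))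
  else dp

-- A's `while b**count <= n` loop; fuel 64 only makes the recursion total (6^64, 9^64 exceed every Dom input)
def aLoop (b n i : Int) : Nat → Nat → Array Int → Array Int
  | 0, _, dp => dp
  | fuel+1, count, dp =>
    if b ^ count ≤ n then aLoop b n i fuel (count + 1) (aUpd i (b ^ count) dp) else dp

def calc_dp (n : Int) : Int :=
  let dp0 : Array Int := (Array.replicate 100100 ((10:Int)^7)).setIfInBounds 0 0
  let dp := (PySem.List.pyRange 0 100001 1).foldl
    (fun dp i => aLoop 9 n i 64 1 (aLoop 6 n i 64 0 dp)) dp0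
  (PySem.List.pyGet? dp.toList n).getD 0


-- ===== PORT B =====
-- B's `_digit_sum(m, base)`; fuel 64 only makes the while loop total (every value reached inside Pre_ has < 64 digits)
def bDigitSum (base : Int) : Nat → Int → Int → Int
  | 0, _, s => s
  | fuel+1, m, s =>
      if m ≠ 0 then bDigitSum base fuel (PySem.Int.floordiv m base) (s + PySem.Int.mod m base) else s

-- Python's `best` is None until the first iteration; `.getD 0` renders the final None of an
-- empty range (n < 0, outside Pre_) as an Int.
def calc_dp_alt (n : Int) : Int :=
  ((PySem.List.pyRange 0 (n + 1) 1).foldl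
    (fun best a =>
      let c := bDigitSum 6 64 a 0 + bDigitSum 9 64 (n - a) 0
      match best with
      | none => some c
      | some b => if c < b then some c else some b)
    (none : Option Int)).getD 0

-- ===== PRECONDITION & SPEC =====
-- Pre_ excludes: n ≥ 100100 and n < -100100, where A raises IndexError; negative n, where A's value
-- (the ten-million sentinel, or 0 at n = -100100) comes from Python's negative-index wraparound into
-- the scratch array while B returns None, not an int; and 100001 ≤ n ≤ 100099, where A returns the
-- untouched ten-million padding value of its deliberately oversized array rather than any DP result
-- (B returns the actual minimal count there).
def Pre_calc_dp (n : Int) : Prop := 0 ≤ n ∧ n ≤ 100000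
instance (n : Int) : Decidable (Pre_calc_dp n) := by unfold Pre_calc_dp; infer_instance
def pvWitness_calc_dp : Int := 10
def Spec_calc_dp (n : Int) (out : Int) : Prop := out = calc_dp_alt n
instance (n : Int) (out : Int) : Decidable (Spec_calc_dp n out) := by unfold Spec_calc_dp; infer_instance

-- ===== CLAIM (what is proved, stated in full; the proofs are below) =====
def Claim_equal_calc_dp : Prop := ∀ (n : Int), Dom_calc_dp n → Pre_calc_dp n → Spec_calc_dp n (calc_dp n)

-- ===== LEMMAS AND PROOFS =====

-- ---------- the power list A enumerates ----------
def powsRef (b : Int) (c fuel : Nat) (n : Int) : List Int :=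
  ((List.range fuel).map (fun j => b ^ (c + j))).takeWhile (fun p => p ≤ n)

theorem powsRef_cons {b : Int} {c : Nat} (fuel : Nat) {n : Int} (h : b ^ c ≤ n) :
    powsRef b c (fuel + 1) n = b ^ c :: powsRef b (c + 1) fuel n := by
  unfold powsRef
  rw [List.range_succ_eq_map, List.map_cons, List.map_map, List.takeWhile_cons]
  simp [h]
  congr 1
  apply List.map_congr_left
  intro j _
  simp only [Function.comp]
  congr 1
  omega

theorem powsRef_nil {b : Int} {c : Nat} (fuel : Nat) {n : Int} (h : ¬ b ^ c ≤ n) :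
    powsRef b c (fuel + 1) n = [] := by
  unfold powsRef
  rw [List.range_succ_eq_map, List.map_cons, List.takeWhile_cons]
  simp [h]

def pvP (n : Int) : List Int := powsRef 6 0 64 n ++ powsRef 9 1 64 n

theorem aLoop_eq (b n i : Int) : ∀ (fuel c : Nat) (dp : Array Int),
    aLoop b n i fuel c dp = (powsRef b c fuel n).foldl (fun dp p => aUpd i p dp) dp := by
  intro fuel
  induction fuel with
  | zero => intro c dp; simp [aLoop, powsRef]
  | succ m ih =>
    intro c dp
    by_cases h : b ^ c ≤ n
    · rw [powsRef_cons m h]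
      simp only [aLoop, if_pos h, List.foldl_cons]
      exact ih (c+1) _
    · rw [powsRef_nil m h]
      simp [aLoop, h]

theorem mem_pvP {n p : Int} (h : p ∈ pvP n) : 1 ≤ p ∧ p ≤ n := by
  unfold pvP powsRef at h
  rcases List.mem_append.1 h with h' | h' <;>
  · refine ⟨?_, by simpa using List.mem_takeWhile_imp h'⟩
    have := (List.takeWhile_sublist _).subset h'
    simp only [List.mem_map] at this
    obtain ⟨j, _, rfl⟩ := this
    exact one_le_pow₀ (by norm_num)

theorem mem_powsRef {b : Int} (hb : 1 ≤ b) {n : Int} :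
    ∀ (t c fuel : Nat), t < fuel → b ^ (c + t) ≤ n → b ^ (c + t) ∈ powsRef b c fuel n := by
  intro t
  induction t with
  | zero =>
    intro c fuel hf hle
    obtain ⟨f, rfl⟩ : ∃ f, fuel = f + 1 := ⟨fuel - 1, by omega⟩
    rw [powsRef_cons f (by simpa using hle)]
    simp
  | succ t ih =>
    intro c fuel hf hle
    obtain ⟨f, rfl⟩ : ∃ f, fuel = f + 1 := ⟨fuel - 1, by omega⟩
    have hhead : b ^ c ≤ n :=
      le_trans (pow_le_pow_right₀ hb (by omega)) hle
    rw [powsRef_cons f hhead]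
    have := ih (c + 1) f (by omega) (by rw [show c + 1 + t = c + (t + 1) by omega]; exact hle)
    rw [show c + 1 + t = c + (t + 1) by omega] at this
    exact List.mem_cons_of_mem _ this

theorem one_mem_pvP {n : Int} (h : 1 ≤ n) : (1 : Int) ∈ pvP n := by
  unfold pvP
  apply List.mem_append_left
  have : (6:Int) ^ (0:Nat) ≤ n := by simpa using h
  rw [show (64:Nat) = 63 + 1 from rfl, powsRef_cons 63 this]
  simp

theorem six_pow_mem_pvP {n : Int} {j : Nat} (hle : (6:Int) ^ j ≤ n) (hn : n ≤ 100000) :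
    (6:Int) ^ j ∈ pvP n := by
  have hj : j < 64 := by
    by_contra hj
    have : (6:Int) ^ 64 ≤ 6 ^ j := pow_le_pow_right₀ (by norm_num) (by omega)
    have h64 : (100000 : Int) < 6 ^ 64 := by norm_num
    omega
  exact List.mem_append_left _ (by simpa using mem_powsRef (by norm_num) j 0 64 hj (by simpa using hle))

theorem nine_pow_mem_pvP {n : Int} {j : Nat} (hj1 : 1 ≤ j) (hle : (9:Int) ^ j ≤ n)
    (hn : n ≤ 100000) : (9:Int) ^ j ∈ pvP n := by
  have hj : j - 1 < 64 := by
    by_contra hj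
    have : (9:Int) ^ 64 ≤ 9 ^ j := pow_le_pow_right₀ (by norm_num) (by omega)
    have h64 : (100000 : Int) < 9 ^ 64 := by norm_num
    omega
  have := mem_powsRef (b := (9:Int)) (n := n) (by norm_num) (j - 1) 1 64 hj
    (by rw [show 1 + (j - 1) = j by omega]; exact hle)
  rw [show 1 + (j - 1) = j by omega] at this
  exact List.mem_append_right _ (this)

theorem pvP_shape {n q : Int} (h : q ∈ pvP n) :
    (∃ j : Nat, q = 6 ^ j) ∨ (∃ j : Nat, 1 ≤ j ∧ q = 9 ^ j) := by
  unfold pvP powsRef at h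
  rcases List.mem_append.1 h with h' | h'
  · left
    have := (List.takeWhile_sublist _).subset h'
    simp only [List.mem_map] at this
    obtain ⟨j, _, rfl⟩ := this
    exact ⟨0 + j, rfl⟩
  · right
    have := (List.takeWhile_sublist _).subset h'
    simp only [List.mem_map] at this
    obtain ⟨j, _, rfl⟩ := this
    exact ⟨1 + j, by omega, rfl⟩

-- ---------- array helpers ----------
theorem arrGetD_set_self (a : Array Int) (i : Nat) (v : Int) (h : i < a.size) :
    (a.setIfInBounds i v).getD i 0 = v := by
  simp [Array.getD, h]
theorem arrGetD_set_ne (a : Array Int) (i j : Nat) (v : Int) (h : i ≠ j) :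
    (a.setIfInBounds i v).getD j 0 = a.getD j 0 := by
  simp only [Array.getD, Array.size_setIfInBounds]
  split
  · rename_i hj
    exact Array.getElem_setIfInBounds_ne hj h
  · rfl
theorem arrSet_getD_self (a : Array Int) (i : Nat) (h : i < a.size) :
    a.setIfInBounds i (a.getD i 0) = a := by
  apply Array.ext
  · simp
  · intro j hj _
    rw [Array.getElem_setIfInBounds]
    split
    · simp_all [Array.getD]
    · rfl
theorem arrGetD_toList (a : Array Int) (i : Nat) : a.getD i 0 = a.toList.getD i 0 := by
  simp [Array.getD, List.getD]
  split <;> rename_i hlt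
  · rw [Array.getElem?_eq_getElem hlt]
    rfl
  · rw [Array.getElem?_eq_none (by omega)]
    rfl

-- ---------- A's inner double loop as one min-fold ----------
def mf (i : Int) (dp : Array Int) (v : Int) (ps : List Int) : Int :=
  ps.foldl (fun v p => if i - p ≥ 0 then min v (1 + dp.getD (i - p).toNat 0) else v) v

theorem mf_set (i : Int) (dp : Array Int) (x : Int) :
    ∀ (ps : List Int) (v : Int), (∀ p ∈ ps, 1 ≤ p) → 0 ≤ i →
    mf i (dp.setIfInBounds i.toNat x) v ps = mf i dp v ps := by
  intro ps
  induction ps with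
  | nil => intro v _ _; rfl
  | cons p t ih =>
    intro v hmem hi
    have hp : 1 ≤ p := hmem p (List.mem_cons_self)
    simp only [mf, List.foldl_cons]
    by_cases hg : i - p ≥ 0
    · rw [if_pos hg, if_pos hg, arrGetD_set_ne _ _ _ _ (by omega)]
      exact ih _ (fun q hq => hmem q (List.mem_cons_of_mem _ hq)) hi
    · rw [if_neg hg, if_neg hg]
      exact ih _ (fun q hq => hmem q (List.mem_cons_of_mem _ hq)) hi

theorem foldl_aUpd (i : Int) :
    ∀ (ps : List Int) (dp : Array Int), (∀ p ∈ ps, 1 ≤ p) → 0 ≤ i → i.toNat < dp.size →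
    ps.foldl (fun dp p => aUpd i p dp) dp
      = dp.setIfInBounds i.toNat (mf i dp (dp.getD i.toNat 0) ps) := by
  intro ps
  induction ps with
  | nil => intro dp _ _ hsz; rw [List.foldl_nil, mf, List.foldl_nil, arrSet_getD_self _ _ hsz]
  | cons p t ih =>
    intro dp hmem hi hsz
    have hp : 1 ≤ p := hmem p (List.mem_cons_self)
    have hmem' : ∀ q ∈ t, 1 ≤ q := fun q hq => hmem q (List.mem_cons_of_mem _ hq)
    rw [List.foldl_cons]
    by_cases hg : i - p ≥ 0
    · have ha : aUpd i p dp
          = dp.setIfInBounds i.toNat (min (dp.getD i.toNat 0) (1 + dp.getD (i - p).toNat 0)) := by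
        rw [aUpd, if_pos hg]
      rw [ha, ih _ hmem' hi (by simpa using hsz)]
      rw [Array.setIfInBounds_setIfInBounds]
      rw [arrGetD_set_self _ _ _ hsz, mf_set _ _ _ _ _ hmem' hi]
      simp only [mf, List.foldl_cons, if_pos hg]
    · have ha : aUpd i p dp = dp := by rw [aUpd, if_neg hg]
      rw [ha, ih _ hmem' hi hsz]
      simp only [mf, List.foldl_cons, if_neg hg]

-- ---------- the DP value A computes, as a recurrence ----------
def Vlist (n : Int) : Nat → List Int
  | 0 => [0]
  | k+1 => Vlist n k ++ [1 + (PySem.List.min?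
      (((pvP n).filter (fun q => q ≤ (k : Int) + 1)).map
        (fun q => (Vlist n k).getD (k + 1 - q.toNat) 0))
      (fun x => x)).getD 0]

def V (n : Int) (i : Nat) : Int := (Vlist n i).getD i 0

theorem getD_append_length (l : List Int) (x : Int) {m : Nat} (h : m = l.length) :
    (l ++ [x]).getD m 0 = x := by
  subst h
  rw [List.getD, List.getElem?_append_right (Nat.le_refl _)]
  simp

theorem length_Vlist (n : Int) : ∀ k, (Vlist n k).length = k + 1 := by
  intro k
  induction k with
  | zero => rfl
  | succ m ih => simp [Vlist, ih]

theorem Vlist_getD_stable (n : Int) : ∀ (k' k j : Nat), k ≤ k' → j ≤ k →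
    (Vlist n k').getD j 0 = (Vlist n k).getD j 0 := by
  intro k'
  induction k' with
  | zero => intro k j hk hj; have hk0 : k = 0 := by omega
            subst hk0; rfl
  | succ m ih =>
    intro k j hk hj
    rcases Nat.eq_or_lt_of_le hk with rfl | hlt
    · rfl
    · have hk' : k ≤ m := by omega
      rw [show Vlist n (m+1) = Vlist n m ++ _ from rfl,
        List.getD_append _ _ 0 j (by rw [length_Vlist]; omega)]
      exact ih k j hk' hj

theorem V_succ (n : Int) (k : Nat) : V n (k+1) = 1 + (PySem.List.min?
    (((pvP n).filter (fun q => q ≤ (k : Int) + 1)).map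
      (fun q => V n (k + 1 - q.toNat)))
    (fun x => x)).getD 0 := by
  rw [V, show Vlist n (k+1) = Vlist n k ++ _ from rfl]
  rw [getD_append_length _ _ ((length_Vlist n k).symm)]
  congr 2
  refine congrArg (fun ys => PySem.List.min? ys (fun x : Int => x)) ?_
  apply List.map_congr_left
  intro q hq
  have hq1 : 1 ≤ q := (mem_pvP (List.mem_of_mem_filter hq)).1
  have hqk : q ≤ (k:Int) + 1 := by simpa using List.of_mem_filter hq
  rw [V]
  exact Vlist_getD_stable n k (k + 1 - q.toNat) (k + 1 - q.toNat) (by omega) (le_refl _)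

theorem V_le {n : Int} (h1 : 1 ≤ n) : ∀ k : Nat, (k : Int) ≤ n → V n k ≤ k := by
  intro k
  induction k with
  | zero => intro _; simp [V, Vlist]
  | succ m ih =>
    intro hm
    have h1f : (1:Int) ∈ (pvP n).filter (fun q => q ≤ (m : Int) + 1) := by
      rw [List.mem_filter]
      exact ⟨one_mem_pvP h1, by simp⟩
    have hmm : V n (m + 1 - (1:Int).toNat) ∈ ((pvP n).filter (fun q => q ≤ (m : Int) + 1)).map
        (fun q => V n (m + 1 - q.toNat)) := List.mem_map_of_mem h1f
    rcases ho : PySem.List.min? (((pvP n).filter (fun q => q ≤ (m : Int) + 1)).map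
        (fun q => V n (m + 1 - q.toNat))) (fun x => x) with _ | mv
    · rw [(PySem.List.min?_eq_none_iff _ _).1 ho] at hmm
      simp at hmm
    · have hle := PySem.List.min?_isMin ho _ hmm
      rw [V_succ, ho]
      simp only [Option.getD_some]
      have : V n m ≤ m := ih (by omega)
      simp only [Int.toNat_one, Nat.add_sub_cancel] at hle
      push_cast
      omega

theorem foldl_min_comm : ∀ (t : List Int) (a x : Int), t.foldl min (min a x) = min a (t.foldl min x) := by
  intro t
  induction t with
  | nil => intro a x; rfl
  | cons y t ih =>
    intro a x
    simp only [List.foldl_cons, min_assoc]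
    exact ih a (min x y)

theorem foldl_min_add : ∀ (t : List Int) (c x : Int),
    (t.map (fun y => c + y)).foldl min (c + x) = c + t.foldl min x := by
  intro t
  induction t with
  | nil => intro c x; rfl
  | cons y t ih =>
    intro c x
    simp only [List.map_cons, List.foldl_cons]
    rw [min_add_add_left]
    exact ih c (min x y)

theorem mf_filter (i : Int) (dp : Array Int) (v : Int) (ps : List Int) :
    mf i dp v ps = (ps.filter (fun p => p ≤ i)).foldl
      (fun v p => min v (1 + dp.getD (i - p).toNat 0)) v := by
  rw [mf, List.foldl_filter]
  apply PySem.List.foldl_congr_mem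
  intro acc p _
  by_cases h : p ≤ i
  · rw [if_pos (by omega), if_pos (by simpa using h)]
  · rw [if_neg (by omega), if_neg (by simpa using h)]

theorem step_val {n : Int} (h1 : 1 ≤ n) (h2 : n ≤ 100000) {k : Nat} (hk1 : 1 ≤ k)
    (hkN : (k : Int) ≤ n) (dp : Array Int)
    (hread : ∀ j : Nat, j < k → (j : Int) ≤ n → dp.getD j 0 = V n j) :
    mf (k : Int) dp (10^7) (pvP n) = V n k := by
  rw [mf_filter]
  have hcongr : ((pvP n).filter (fun q => q ≤ (k : Int))).foldl
        (fun v p => min v (1 + dp.getD ((k : Int) - p).toNat 0)) (10^7)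
      = ((pvP n).filter (fun q => q ≤ (k : Int))).foldl
        (fun v q => min v (1 + V n (k - q.toNat))) (10^7) := by
    apply PySem.List.foldl_congr_mem
    intro acc q hq
    have hq1 : 1 ≤ q := (mem_pvP (List.mem_of_mem_filter hq)).1
    have hqn : q ≤ n := (mem_pvP (List.mem_of_mem_filter hq)).2
    have hqk : q ≤ (k : Int) := by simpa using List.of_mem_filter hq
    have hidx : ((k : Int) - q).toNat = k - q.toNat := by omega
    rw [hidx, hread (k - q.toNat) (by omega) (by omega)]
  rw [hcongr]
  have h1f : (1:Int) ∈ (pvP n).filter (fun q => q ≤ (k : Int)) := by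
    rw [List.mem_filter]
    refine ⟨one_mem_pvP h1, by simp; omega⟩
  rcases hl : (pvP n).filter (fun q => q ≤ (k : Int)) with _ | ⟨q0, t⟩
  · rw [hl] at h1f; simp at h1f
  rw [← List.foldl_map]
  rw [show (q0 :: t).map (fun q => 1 + V n (k - q.toNat))
        = (1 + V n (k - q0.toNat)) :: (t.map (fun q => V n (k - q.toNat))).map (fun y => 1 + y) by
      simp [List.map_map]]
  rw [List.foldl_cons, foldl_min_comm, foldl_min_add]
  have e1 : ((k - 1 : Nat) : Int) + 1 = (k : Int) := by omega
  have e2 : (k - 1) + 1 = k := by omega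
  have hV := V_succ n (k - 1)
  rw [e2] at hV
  simp only [e1] at hV
  rw [hl] at hV
  rw [show (q0 :: t).map (fun q => V n (k - q.toNat))
        = V n (k - q0.toNat) :: t.map (fun q => V n (k - q.toNat)) from List.map_cons .. ] at hV
  rw [PySem.List.min?_id_cons] at hV
  simp only [Option.getD_some] at hV
  rw [← hV]
  have hb : V n k ≤ (k : Int) := V_le h1 k hkN
  omega

theorem mf_zero (n : Int) (dp : Array Int) (v : Int) : mf 0 dp v (pvP n) = v := by
  rw [mf_filter]
  rw [List.filter_eq_nil_iff.2 (fun q hq => by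
    have := (mem_pvP hq).1
    simp
    omega)]
  rfl

def Adp (n : Int) (k : Nat) : Array Int :=
  (PySem.List.pyRange 0 (k : Int) 1).foldl
    (fun dp i => aLoop 9 n i 64 1 (aLoop 6 n i 64 0 dp))
    ((Array.replicate 100100 ((10:Int)^7)).setIfInBounds 0 0)

theorem Astep_set (n i : Int) (dp : Array Int) (hi : 0 ≤ i) (hsz : i.toNat < dp.size) :
    aLoop 9 n i 64 1 (aLoop 6 n i 64 0 dp)
      = dp.setIfInBounds i.toNat (mf i dp (dp.getD i.toNat 0) (pvP n)) := by
  rw [aLoop_eq, aLoop_eq, ← List.foldl_append]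
  exact foldl_aUpd i (pvP n) dp (fun p hp => (mem_pvP hp).1) hi hsz

theorem Adp_succ (n : Int) (k : Nat) :
    Adp n (k + 1) = aLoop 9 n (k : Int) 64 1 (aLoop 6 n (k : Int) 64 0 (Adp n k)) := by
  unfold Adp
  rw [show ((k + 1 : Nat) : Int) = (k : Int) + 1 by push_cast; ring,
    PySem.List.pyRange_one_succ_right (by positivity), List.foldl_append]
  rfl

theorem A_inv (n : Int) (h0 : 0 ≤ n) (h2 : n ≤ 100000) : ∀ k : Nat, k ≤ 100001 →
    (Adp n k).size = 100100
    ∧ (∀ j : Nat, j < k → (j : Int) ≤ n → (Adp n k).getD j 0 = V n j)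
    ∧ (∀ j : Nat, k ≤ j → j < 100100 → j ≠ 0 → (Adp n k).getD j 0 = 10^7)
    ∧ (Adp n k).getD 0 0 = 0 := by
  intro k
  induction k with
  | zero =>
    intro _
    have h00 : Adp n 0 = (Array.replicate 100100 ((10:Int)^7)).setIfInBounds 0 0 := by
      unfold Adp
      rw [show ((0:Nat):Int) = 0 from rfl, PySem.List.pyRange_one_eq_nil (le_refl _)]
      exact List.foldl_nil
    rw [h00]
    refine ⟨by rw [Array.size_setIfInBounds, Array.size_replicate], fun j hj _ => by omega, fun j _ hj hj0 => ?_, ?_⟩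
    · rw [arrGetD_set_ne _ _ _ _ (Ne.symm hj0)]
      simp [Array.getD, Array.size_replicate, hj, Array.getElem_replicate]
    · rw [arrGetD_set_self _ _ _ (by rw [Array.size_replicate]; omega)]
  | succ k ih =>
    intro hk1
    obtain ⟨hsz, hpre, hsuf, hzero⟩ := ih (by omega)
    have hkk : k ≤ 100000 := by omega
    have hset : Adp n (k+1) = (Adp n k).setIfInBounds k
        (mf (k : Int) (Adp n k) ((Adp n k).getD k 0) (pvP n)) := by
      rw [Adp_succ, Astep_set n (k : Int) _ (by positivity) (by rw [hsz]; simp; omega)]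
      simp only [Int.toNat_natCast]
    rw [hset]
    refine ⟨by rw [Array.size_setIfInBounds]; exact hsz, ?_, ?_, ?_⟩
    · intro j hj hjn
      rcases Nat.lt_or_ge j k with hlt | hge
      · rw [arrGetD_set_ne _ _ _ _ (by omega)]
        exact hpre j hlt hjn
      · have hjk : j = k := by omega
        subst hjk
        rw [arrGetD_set_self _ _ _ (by rw [hsz]; omega)]
        rcases Nat.eq_zero_or_pos j with rfl | hj1
        · rw [show ((0:Nat):Int) = 0 from rfl, mf_zero, hzero]
          rfl
        · rw [hsuf j (le_refl _) (by omega) (by omega)]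
          exact step_val (by omega) h2 hj1 hjn _ hpre
    · intro j hjk hj100 hj0
      rw [arrGetD_set_ne _ _ _ _ (by omega)]
      exact hsuf j (by omega) hj100 hj0
    · rcases Nat.eq_zero_or_pos k with rfl | hk0
      · rw [arrGetD_set_self _ _ _ (by rw [hsz]; omega)]
        rw [show ((0:Nat):Int) = 0 from rfl, mf_zero, hzero]
      · rw [arrGetD_set_ne _ _ _ _ (by omega)]
        exact hzero

theorem calc_dp_eq_V (n : Int) (h0 : 0 ≤ n) (h2 : n ≤ 100000) : calc_dp n = V n n.toNat := by
  obtain ⟨hsz, hpre, _, _⟩ := A_inv n h0 h2 100001 (le_refl _)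
  simp only [calc_dp]
  rw [show PySem.List.pyRange 0 100001 1 = PySem.List.pyRange 0 ((100001 : Nat) : Int) 1 by
    norm_num]
  rw [show ((PySem.List.pyRange 0 ((100001 : Nat) : Int) 1).foldl
      (fun dp i => aLoop 9 n i 64 1 (aLoop 6 n i 64 0 dp))
      ((Array.replicate 100100 ((10:Int)^7)).setIfInBounds 0 0)) = Adp n 100001 from rfl]
  rw [PySem.List.pyGet?_of_nonneg _ h0]
  rw [List.getElem?_eq_getElem (by rw [Array.length_toList, hsz]; omega)]
  rw [Option.getD_some]
  rw [← hpre n.toNat (by omega) (by omega)]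
  rw [arrGetD_toList]
  rw [List.getD, List.getElem?_eq_getElem (by rw [Array.length_toList, hsz]; omega),
    Option.getD_some]

-- ---------- digit sums ----------
def dsum (β m : Nat) : Nat := (Nat.digits β m).sum

def cost (k a : Nat) : Nat := dsum 6 a + dsum 9 (k - a)

theorem dsum_eq {β : Nat} (hβ : 2 ≤ β) (x : Nat) : dsum β x = x % β + dsum β (x / β) := by
  rcases Nat.eq_zero_or_pos x with rfl | hx
  · simp [dsum]
  · unfold dsum
    rw [Nat.digits_def' (by omega : 1 < β) hx]
    simp

theorem dsum_mul_add {β : Nat} (hβ : 2 ≤ β) (q r : Nat) (hr : r < β) :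
    dsum β (β * q + r) = r + dsum β q := by
  rw [dsum_eq hβ]
  rw [Nat.mul_add_mod, Nat.mul_add_div (by omega), Nat.div_eq_of_lt hr, Nat.mod_eq_of_lt hr]
  simp

theorem dsum_succ_le {β : Nat} (hβ : 2 ≤ β) : ∀ x, dsum β (x + 1) ≤ dsum β x + 1 := by
  intro x
  induction x using Nat.strong_induction_on with
  | _ x ih =>
    have hmd := Nat.div_add_mod x β
    have hlt : x % β < β := Nat.mod_lt _ (by omega)
    by_cases h : x % β + 1 < β
    · have he : x + 1 = β * (x / β) + (x % β + 1) := by omega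
      rw [he, dsum_mul_add hβ _ _ h, dsum_eq hβ x]
      omega
    · have hd2 : β * (x / β + 1) = β * (x / β) + β := by ring
      have he : x + 1 = β * (x / β + 1) + 0 := by omega
      rw [he, dsum_mul_add hβ _ _ (by omega)]
      have hx1 : 1 ≤ x := by omega
      have hih : dsum β (x / β + 1) ≤ dsum β (x / β) + 1 :=
        ih (x / β) (Nat.div_lt_self (by omega) (by omega))
      rw [dsum_eq hβ x]
      omega

theorem dsum_add_pow_le {β : Nat} (hβ : 2 ≤ β) : ∀ (j x : Nat), dsum β (x + β ^ j) ≤ dsum β x + 1 := by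
  intro j
  induction j with
  | zero => intro x; simpa using dsum_succ_le hβ x
  | succ j ih =>
    intro x
    have hmd := Nat.div_add_mod x β
    have hlt : x % β < β := Nat.mod_lt _ (by omega)
    have he : x + β ^ (j + 1) = β * (x / β + β ^ j) + x % β := by
      rw [pow_succ]
      ring_nf
      omega
    rw [he, dsum_mul_add hβ _ _ hlt, dsum_eq hβ x]
    have := ih (x / β)
    omega

theorem dsum_sub_pow {β : Nat} (hβ : 2 ≤ β) :
    ∀ x, 0 < x → ∃ j, β ^ j ≤ x ∧ dsum β (x - β ^ j) + 1 = dsum β x ∧ (x % β = 0 → 1 ≤ j) := by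
  intro x
  induction x using Nat.strong_induction_on with
  | _ x ih =>
    intro hx
    have hmd := Nat.div_add_mod x β
    have hlt : x % β < β := Nat.mod_lt _ (by omega)
    by_cases h : 0 < x % β
    · refine ⟨0, by simpa using hx, ?_, by omega⟩
      have he : x - β ^ 0 = β * (x / β) + (x % β - 1) := by
        simp only [pow_zero]
        omega
      rw [he, dsum_mul_add hβ _ _ (by omega), dsum_eq hβ x]
      omega
    · have hdvd : β ∣ x := Nat.dvd_of_mod_eq_zero (by omega)
      have hq : 0 < x / β := Nat.div_pos (Nat.le_of_dvd hx hdvd) (by omega)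
      obtain ⟨j, hj1, hj2, _⟩ := ih (x / β) (Nat.div_lt_self hx (by omega)) hq
      refine ⟨j + 1, ?_, ?_, by omega⟩
      · calc β ^ (j + 1) = β * β ^ j := by rw [pow_succ]; ring
          _ ≤ β * (x / β) := by exact Nat.mul_le_mul_left β hj1
          _ ≤ x := by omega
      · have he : x - β ^ (j + 1) = β * (x / β - β ^ j) + 0 := by
          have hd1 : β * (x / β - β ^ j) = β * (x / β) - β * β ^ j := Nat.mul_sub β _ _
          have hd2 : β * β ^ j ≤ β * (x / β) := Nat.mul_le_mul_left β hj1
          have hd3 : β ^ (j + 1) = β * β ^ j := by rw [pow_succ]; ring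
          omega
        rw [he, dsum_mul_add hβ _ _ (by omega), dsum_eq hβ x]
        omega

-- ---------- V equals the minimal split cost ----------
theorem cast_pow6 (j : Nat) : ((6 ^ j : Nat) : Int) = (6:Int) ^ j := by norm_cast
theorem cast_pow9 (j : Nat) : ((9 ^ j : Nat) : Int) = (9:Int) ^ j := by norm_cast

theorem V_zero (n : Int) : V n 0 = 0 := rfl

theorem V_ub {n : Int} (h1 : 1 ≤ n) (h2 : n ≤ 100000) :
    ∀ k : Nat, (k : Int) ≤ n → ∀ a : Nat, a ≤ k → V n k ≤ (cost k a : Int) := by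
  intro k
  induction k using Nat.strong_induction_on with
  | _ k ih =>
    intro hkn a hak
    rcases Nat.eq_zero_or_pos k with rfl | hk1
    · have ha0 : a = 0 := by omega
      subst ha0
      simp [V_zero, cost, dsum]
    obtain ⟨m, rfl⟩ : ∃ m, k = m + 1 := ⟨k - 1, by omega⟩
    -- pick the power p to subtract, together with its digit-sum bookkeeping
    have key : ∃ (p : Int) (t a' : Nat), p ∈ pvP n ∧ p ≤ (m : Int) + 1 ∧ p.toNat = t ∧
        1 ≤ t ∧ t ≤ m + 1 ∧ a' ≤ m + 1 - t ∧ cost (m + 1 - t) a' + 1 ≤ cost (m + 1) a := by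
      rcases Nat.eq_zero_or_pos a with rfl | ha1
      · -- a = 0: take a power of 9 (or 1 = 6^0 when the base-9 units digit is nonzero)
        obtain ⟨j, hj1, hj2, hj3⟩ := dsum_sub_pow (by norm_num : 2 ≤ 9) (m + 1) (by omega)
        rcases Nat.eq_zero_or_pos j with rfl | hjpos
        · refine ⟨1, 1, 0, one_mem_pvP h1, by omega, rfl, le_refl _, by omega, by omega, ?_⟩
          simp only [cost, dsum, Nat.digits_zero, List.sum_nil, Nat.zero_add, Nat.sub_zero] at *
          simp only [pow_zero] at hj2
          omega
        · have hcast : ((9 ^ j : Nat) : Int) ≤ ((m + 1 : Nat) : Int) := Int.ofNat_le.mpr hj1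
          rw [cast_pow9] at hcast
          have hple : ((9:Int) ^ j) ≤ n := by push_cast at hcast; omega
          refine ⟨(9:Int) ^ j, 9 ^ j, 0, nine_pow_mem_pvP hjpos hple h2, ?_, ?_, ?_, hj1, by omega, ?_⟩
          · push_cast at hcast; omega
          · rw [← cast_pow9, Int.toNat_natCast]
          · exact Nat.one_le_pow _ _ (by omega)
          · simp only [cost, dsum, Nat.digits_zero, List.sum_nil, Nat.zero_add, Nat.sub_zero] at *
            omega
      · -- a > 0: take the lowest nonzero base-6 digit of a
        obtain ⟨j, hj1, hj2, _⟩ := dsum_sub_pow (by norm_num : 2 ≤ 6) a ha1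
        have hcast : ((6 ^ j : Nat) : Int) ≤ ((m + 1 : Nat) : Int) :=
          Int.ofNat_le.mpr (le_trans hj1 hak)
        rw [cast_pow6] at hcast
        have hple : ((6:Int) ^ j) ≤ n := by push_cast at hcast; omega
        refine ⟨(6:Int) ^ j, 6 ^ j, a - 6 ^ j, six_pow_mem_pvP hple h2, ?_, ?_, ?_, by omega, by omega, ?_⟩
        · push_cast at hcast; omega
        · rw [← cast_pow6, Int.toNat_natCast]
        · exact Nat.one_le_pow _ _ (by omega)
        · have he : m + 1 - 6 ^ j - (a - 6 ^ j) = m + 1 - a := by omega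
          simp only [cost, he]
          omega
    obtain ⟨p, t, a', hpP, hpk, hpt, ht1, htk, ha', hcost⟩ := key
    -- V (m+1) ≤ 1 + V (m+1-t) via the recurrence
    have hpf : p ∈ (pvP n).filter (fun q => q ≤ (m : Int) + 1) :=
      List.mem_filter.2 ⟨hpP, by simpa using hpk⟩
    have hmm : V n (m + 1 - p.toNat) ∈ ((pvP n).filter (fun q => q ≤ (m : Int) + 1)).map
        (fun q => V n (m + 1 - q.toNat)) := List.mem_map_of_mem hpf
    rcases ho : PySem.List.min? (((pvP n).filter (fun q => q ≤ (m : Int) + 1)).map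
        (fun q => V n (m + 1 - q.toNat))) (fun x => x) with _ | mv
    · rw [(PySem.List.min?_eq_none_iff _ _).1 ho] at hmm
      simp at hmm
    · have hle := PySem.List.min?_isMin ho _ hmm
      simp only at hle
      rw [V_succ, ho, Option.getD_some]
      rw [hpt] at hle
      have hIH : V n (m + 1 - t) ≤ (cost (m + 1 - t) a' : Int) :=
        ih (m + 1 - t) (by omega) (by push_cast at hkn ⊢; omega) a' ha'
      have : (cost (m + 1 - t) a' : Int) + 1 ≤ (cost (m + 1) a : Int) := by exact_mod_cast hcost
      omega

theorem V_lb {n : Int} (h1 : 1 ≤ n) (h2 : n ≤ 100000) :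
    ∀ k : Nat, (k : Int) ≤ n → ∃ a ≤ k, (cost k a : Int) ≤ V n k := by
  intro k
  induction k using Nat.strong_induction_on with
  | _ k ih =>
    intro hkn
    rcases Nat.eq_zero_or_pos k with rfl | hk1
    · exact ⟨0, le_refl _, by simp [V_zero, cost, dsum]⟩
    obtain ⟨m, rfl⟩ : ∃ m, k = m + 1 := ⟨k - 1, by omega⟩
    have h1f : (1:Int) ∈ (pvP n).filter (fun q => q ≤ (m : Int) + 1) := by
      rw [List.mem_filter]
      exact ⟨one_mem_pvP h1, by simp⟩
    rcases ho : PySem.List.min? (((pvP n).filter (fun q => q ≤ (m : Int) + 1)).map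
        (fun q => V n (m + 1 - q.toNat))) (fun x => x) with _ | mv
    · have hmm1 := List.mem_map_of_mem (f := fun q => V n (m + 1 - q.toNat)) h1f
      rw [(PySem.List.min?_eq_none_iff _ _).1 ho] at hmm1
      simp at hmm1
    · obtain ⟨q, hqf, hqv⟩ := List.mem_map.1 (PySem.List.min?_mem ho)
      have hq1 : 1 ≤ q := (mem_pvP (List.mem_of_mem_filter hqf)).1
      have hqk : q ≤ (m : Int) + 1 := by simpa using List.of_mem_filter hqf
      set t := q.toNat with htdef
      have ht1 : 1 ≤ t := by omega
      have htk : t ≤ m + 1 := by omega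
      obtain ⟨a', ha', hca⟩ := ih (m + 1 - t) (by omega) (by push_cast at hkn ⊢; omega)
      have hVk : V n (m + 1) = 1 + V n (m + 1 - t) := by
        rw [V_succ, ho, Option.getD_some, hqv]
      rcases pvP_shape (List.mem_of_mem_filter hqf) with ⟨j, hqe⟩ | ⟨j, hj1, hqe⟩
      · -- q = 6^j : move 6^j into the a-part
        have htj : t = 6 ^ j := by
          rw [htdef, hqe]
          have : ((6:Int) ^ j) = ((6 ^ j : Nat) : Int) := by push_cast; ring
          rw [this, Int.toNat_natCast]
        refine ⟨a' + 6 ^ j, by omega, ?_⟩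
        have hsub : m + 1 - (a' + 6 ^ j) = m + 1 - t - a' := by omega
        have hd : dsum 6 (a' + 6 ^ j) ≤ dsum 6 a' + 1 := dsum_add_pow_le (by norm_num) j a'
        have : cost (m + 1) (a' + 6 ^ j) ≤ cost (m + 1 - t) a' + 1 := by
          simp only [cost, hsub]
          omega
        have hc : (cost (m + 1) (a' + 6 ^ j) : Int) ≤ (cost (m + 1 - t) a' : Int) + 1 := by
          exact_mod_cast this
        omega
      · -- q = 9^j : the b-part grows by 9^j
        have htj : t = 9 ^ j := by
          rw [htdef, hqe]
          have : ((9:Int) ^ j) = ((9 ^ j : Nat) : Int) := by push_cast; ring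
          rw [this, Int.toNat_natCast]
        refine ⟨a', by omega, ?_⟩
        have hsub : m + 1 - a' = (m + 1 - t - a') + 9 ^ j := by omega
        have hd : dsum 9 (m + 1 - t - a' + 9 ^ j) ≤ dsum 9 (m + 1 - t - a') + 1 :=
          dsum_add_pow_le (by norm_num) j _
        have : cost (m + 1) a' ≤ cost (m + 1 - t) a' + 1 := by
          simp only [cost, hsub]
          omega
        have hc : (cost (m + 1) a' : Int) ≤ (cost (m + 1 - t) a' : Int) + 1 := by
          exact_mod_cast this
        omega

-- ---------- B computes the same minimum ----------
theorem bDigitSum_eq {β : Nat} (hβ : 2 ≤ β) :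
    ∀ (fuel : Nat) (m : Nat) (s : Int), m < β ^ fuel →
      bDigitSum (β : Int) fuel (m : Int) s = s + (dsum β m : Int) := by
  intro fuel
  induction fuel with
  | zero =>
    intro m s hm
    have hm0 : m = 0 := by simpa using hm
    subst hm0
    simp [bDigitSum, dsum]
  | succ f ih =>
    intro m s hm
    rcases Nat.eq_zero_or_pos m with rfl | hm1
    · simp [bDigitSum, dsum]
    · rw [bDigitSum, if_pos (by exact_mod_cast (by omega : (m:Int) ≠ 0))]
      rw [PySem.Int.floordiv_natCast, PySem.Int.mod_natCast]
      rw [ih (m / β) _ (by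
        rw [Nat.div_lt_iff_lt_mul (by omega)]
        calc m < β ^ (f + 1) := hm
          _ = β ^ f * β := by rw [pow_succ]
        )]
      rw [dsum_eq hβ m]
      push_cast
      ring

-- B's per-split cost is the split cost
theorem b_cost_eq {n : Int} (h0 : 0 ≤ n) (h2 : n ≤ 100000) (a : Nat) (ha : (a : Int) ≤ n) :
    bDigitSum 6 64 (a : Int) 0 + bDigitSum 9 64 (n - (a:Int)) 0 = (cost n.toNat a : Int) := by
  have ha6 : a < 6 ^ 64 := by
    have : a ≤ 100000 := by omega
    calc a ≤ 100000 := this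
      _ < 6 ^ 64 := by norm_num
  have hb : n - (a:Int) = ((n.toNat - a : Nat) : Int) := by omega
  have hb9 : n.toNat - a < 9 ^ 64 := by
    have : n.toNat - a ≤ 100000 := by omega
    calc n.toNat - a ≤ 100000 := this
      _ < 9 ^ 64 := by norm_num
  rw [hb]
  rw [show (6:Int) = ((6:Nat):Int) by norm_num, show (9:Int) = ((9:Nat):Int) by norm_num]
  rw [bDigitSum_eq (by norm_num) 64 a 0 ha6, bDigitSum_eq (by norm_num) 64 _ 0 hb9]
  simp [cost]

def bBody (n : Int) : Option Int → Int → Option Int := fun best a =>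
  let c := bDigitSum 6 64 a 0 + bDigitSum 9 64 (n - a) 0
  match best with
  | none => some c
  | some b => if c < b then some c else some b

theorem B_fold {n : Int} (h0 : 0 ≤ n) (h2 : n ≤ 100000) :
    ∀ t : Nat, (t : Int) ≤ n →
    ∃ m : Nat, (PySem.List.pyRange 0 ((t : Int) + 1) 1).foldl (bBody n) none = some (m : Int)
      ∧ (∀ a ≤ t, m ≤ cost n.toNat a) ∧ (∃ a ≤ t, cost n.toNat a = m) := by
  intro t
  induction t with
  | zero =>
    intro _
    rw [show ((0:Nat):Int) + 1 = 0 + 1 by ring, PySem.List.pyRange_one_singleton,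
      List.foldl_cons, List.foldl_nil]
    refine ⟨cost n.toNat 0, ?_, ?_, 0, le_refl _, rfl⟩
    · show bBody n none 0 = _
      simp only [bBody]
      have := b_cost_eq h0 h2 0 (by omega)
      simp only [Nat.cast_zero, sub_zero] at this ⊢
      rw [this]
    · intro a ha
      have ha0 : a = 0 := by omega
      subst ha0
      exact le_refl _
  | succ t ih =>
    intro htn
    obtain ⟨m, hm, hmin, hach⟩ := ih (by push_cast at htn ⊢; omega)
    rw [show ((t + 1 : Nat):Int) + 1 = ((t:Int) + 1) + 1 by push_cast; ring,
      PySem.List.pyRange_one_succ_right (by positivity), List.foldl_append, hm,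
      List.foldl_cons, List.foldl_nil]
    have hc : bBody n (some (m:Int)) ((t:Int) + 1)
        = if (cost n.toNat (t+1) : Int) < (m:Int) then some ((cost n.toNat (t+1) : Nat) : Int)
          else some (m:Int) := by
      simp only [bBody]
      rw [show (t:Int) + 1 = (((t+1 : Nat)):Int) by push_cast; ring, b_cost_eq h0 h2 (t+1) htn]
    rw [hc]
    by_cases hlt : (cost n.toNat (t+1) : Int) < (m:Int)
    · rw [if_pos hlt]
      refine ⟨cost n.toNat (t+1), rfl, ?_, t+1, le_refl _, rfl⟩
      intro a ha
      rcases Nat.lt_or_ge a (t+1) with h' | h'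
      · have := hmin a (by omega)
        omega
      · have : a = t + 1 := by omega
        subst this
        exact le_refl _
    · rw [if_neg hlt]
      refine ⟨m, rfl, ?_, ?_⟩
      · intro a ha
        rcases Nat.lt_or_ge a (t+1) with h' | h'
        · exact hmin a (by omega)
        · have : a = t + 1 := by omega
          subst this
          omega
      · obtain ⟨a, ha, he⟩ := hach
        exact ⟨a, by omega, he⟩

theorem main_eq (n : Int) (h0 : 0 ≤ n) (h2 : n ≤ 100000) : calc_dp n = calc_dp_alt n := by
  have hA := calc_dp_eq_V n h0 h2
  obtain ⟨m, hm, hmin, a0, ha0, hach⟩ := B_fold h0 h2 n.toNat (by omega)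
  have hB : calc_dp_alt n = (m : Int) := by
    simp only [calc_dp_alt]
    rw [show n + 1 = ((n.toNat : Nat) : Int) + 1 by omega]
    rw [show (PySem.List.pyRange 0 (((n.toNat : Nat):Int) + 1) 1).foldl
        (fun best a =>
          let c := bDigitSum 6 64 a 0 + bDigitSum 9 64 (n - a) 0
          match best with
          | none => some c
          | some b => if c < b then some c else some b) (none : Option Int)
        = (PySem.List.pyRange 0 (((n.toNat : Nat):Int) + 1) 1).foldl (bBody n) none from rfl]
    rw [hm, Option.getD_some]
  rw [hA, hB]
  by_cases hn0 : n ≤ 0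
  · have : n = 0 := by omega
    subst this
    have ha00 : a0 = 0 := by simpa using ha0
    subst ha00
    simp only [Int.toNat_zero, V_zero] at hach ⊢
    rw [← hach]
    simp [cost, dsum]
  · -- n ≥ 1 : antisymmetry via the two bounds
    have hn1 : 0 < n := by omega
    have hub : V n n.toNat ≤ (cost n.toNat a0 : Int) :=
      V_ub hn1 h2 n.toNat (by omega) a0 ha0
    obtain ⟨a1, ha1, hlb⟩ := V_lb hn1 h2 n.toNat (by omega)
    have h1 : (m : Int) ≤ (cost n.toNat a1 : Int) := by exact_mod_cast hmin a1 ha1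
    have h2' : V n n.toNat ≤ (m : Int) := by rw [hach] at hub; exact hub
    omega

-- ===== VERDICT (by name: the statement is the Claim_ definition above) =====
theorem calc_dp_spec : Claim_equal_calc_dp := by
  intro n _ hpre
  obtain ⟨h0, h2⟩ := hpre
  show calc_dp n = calc_dp_alt n
  exact main_eq n h0 h2
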